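-- pv_equiv track=rewrite | github.com/hackdeacon/VCTI | scripts/export_vlr.py | generate_players_markdown
-- ===== SOURCE A (Python) =====
-- def generate_players_markdown(players):
--     md = "# 职业选手 (Players)\n\n"
--     md += f"共计 {len(players)} 名职业选手\n\n"
--
--     # Group by country
--     by_country = {}
--     for p in players:
--         country = p.get("country", "unknown")
--         if country not in by_country:
--             by_country[country] = []
--         by_country[country].append(p)
--
--     for country, country_players in sorted(by_country.items()):
--         md += f"## {country.upper()}\n\n"
--         for p in sorted(country_players, key=lambda x: x.get("name", "")):
--             name = p.get("name", "")
--             team = p.get("teamTag", "")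
--             pid = p.get("id", "")
--             url = p.get("url", "")
--             team_str = f" [{team}]" if team else ""
--             md += f"- **{name}**{team_str} - [VLR Profile]({url})\n"
--         md += "\n"
--     return md
-- ===== SOURCE B (Python) =====
-- def generate_players_markdown(players):
--     # Same report, built functionally: sorted distinct countries, then one
--     # section per country from a filtered, name-sorted group (no grouping dict).
--     def line(p):
--         team = p.get("teamTag", "")
--         team_str = f" [{team}]" if team else ""
--         return f"- **{p.get('name', '')}**{team_str} - [VLR Profile]({p.get('url', '')})\n"
--
--     def section(country):
--         group = sorted(
--             (p for p in players if p.get("country", "unknown") == country),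
--             key=lambda p: p.get("name", ""),
--         )
--         return f"## {country.upper()}\n\n" + "".join(line(p) for p in group) + "\n"
--
--     countries = sorted({p.get("country", "unknown") for p in players})
--     header = f"# 职业选手 (Players)\n\n共计 {len(players)} 名职业选手\n\n"
--     return header + "".join(section(c) for c in countries)
-- ===== Notes on version B (the rewrite author's own statement) =====
-- stated objective: simpler
-- what changed: Replaces the mutable grouping dict and string accumulator with a functional pipeline: sorted distinct countries, a filtered name-sorted group per country, and joined section strings.
import Mathlib
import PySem

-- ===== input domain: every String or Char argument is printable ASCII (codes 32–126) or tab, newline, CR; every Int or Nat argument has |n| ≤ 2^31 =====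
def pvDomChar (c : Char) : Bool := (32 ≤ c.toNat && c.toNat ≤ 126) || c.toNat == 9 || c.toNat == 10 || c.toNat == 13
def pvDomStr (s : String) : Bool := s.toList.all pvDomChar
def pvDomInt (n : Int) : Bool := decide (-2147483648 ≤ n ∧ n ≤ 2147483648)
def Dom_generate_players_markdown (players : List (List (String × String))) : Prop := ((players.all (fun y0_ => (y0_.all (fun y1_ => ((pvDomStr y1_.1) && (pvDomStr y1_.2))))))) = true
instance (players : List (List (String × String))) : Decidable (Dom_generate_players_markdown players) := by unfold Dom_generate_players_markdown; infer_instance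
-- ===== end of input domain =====

-- B replaces A's mutable grouping dict and string accumulator by a functional pipeline
-- (sorted distinct countries, filter + sort per country, joined sections); same output, similar cost.

-- p.get(k, dflt) on a player dict (the harness builds the Python dict from the pair list,
-- so lookups follow Python's dict semantics via PySem.Dict.ofList)
def pvGet (p : List (String × String)) (k dflt : String) : String :=
  (PySem.Dict.ofList p).getD k dflt

-- ===== PORT A =====
def generate_players_markdown (players : List (List (String × String))) : String :=
  let md : String := "# 职业选手 (Players)\n\n"
  let md := md ++ ("共计 " ++ PySem.Int.toStr (players.length : Int) ++ " 名职业选手\n\n")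
  let by_country : PySem.Dict String (List (List (String × String))) :=
    players.foldl
      (fun d p => d.modify (pvGet p "country" "unknown") [] (fun g => g ++ [p]))
      PySem.Dict.empty
  -- sorted(by_country.items()): dict keys are unique, so Python's tuple comparison
  -- only ever reaches the first component — sorting by the key is exact
  (PySem.List.sorted by_country.items (fun pr => pr.1)).foldl
    (fun md pr =>
      let md := md ++ ("## " ++ PySem.Str.upper pr.1 ++ "\n\n")
      let md := (PySem.List.sorted pr.2 (fun x => pvGet x "name" "")).foldl
        (fun md p =>
          let name := pvGet p "name" ""
          let team := pvGet p "teamTag" ""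
          let _pid := pvGet p "id" ""
          let url := pvGet p "url" ""
          let team_str := if team ≠ "" then " [" ++ team ++ "]" else ""
          md ++ ("- **" ++ name ++ "**" ++ team_str ++ " - [VLR Profile](" ++ url ++ ")\n"))
        md
      md ++ "\n")
    md

-- ===== PORT B =====
def pvB_line (p : List (String × String)) : String :=
  let team := pvGet p "teamTag" ""
  let team_str := if team ≠ "" then " [" ++ team ++ "]" else ""
  "- **" ++ pvGet p "name" "" ++ "**" ++ team_str ++ " - [VLR Profile](" ++ pvGet p "url" "" ++ ")\n"

def pvB_section (players : List (List (String × String))) (country : String) : String :=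
  let group := PySem.List.sorted
    (players.filter (fun p => pvGet p "country" "unknown" == country))
    (fun p => pvGet p "name" "")
  "## " ++ PySem.Str.upper country ++ "\n\n" ++ PySem.Str.join "" (group.map pvB_line) ++ "\n"

def generate_players_markdown_alt (players : List (List (String × String))) : String :=
  let countries := PySem.List.sorted
    (PySem.Set.ofList (players.map (fun p => pvGet p "country" "unknown")))
    (fun c => c)
  let header := "# 职业选手 (Players)\n\n共计 " ++ PySem.Int.toStr (players.length : Int) ++ " 名职业选手\n\n"
  header ++ PySem.Str.join "" (countries.map (pvB_section players))

-- ===== PRECONDITION & SPEC =====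
def Spec_generate_players_markdown (players : List (List (String × String))) (out : String) : Prop := out = generate_players_markdown_alt players
instance (players : List (List (String × String))) (out : String) : Decidable (Spec_generate_players_markdown players out) := by unfold Spec_generate_players_markdown; infer_instance

-- ===== CLAIM (what is proved, stated in full; the proofs are below) =====
def Claim_equal_generate_players_markdown : Prop := ∀ (players : List (List (String × String))), Dom_generate_players_markdown players → Spec_generate_players_markdown players (generate_players_markdown players)

-- ===== LEMMAS AND PROOFS =====

-- "".join on a cons
theorem pv_join_cons (s : String) (rest : List String) :
    PySem.Str.join "" (s :: rest) = s ++ PySem.Str.join "" rest := by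
  cases rest with
  | nil =>
      simp [PySem.Str.join, PySem.Chars.join_singleton, PySem.Chars.join_nil,
        String.ofList_toList]
  | cons q t =>
      simp [PySem.Str.join, PySem.Chars.join_cons_cons, String.ofList_append,
        String.ofList_toList]

-- an 'md += piece(x)' loop is the initial string followed by "".join of the pieces
theorem pv_foldl_append_str {α : Type} (f : α → String) (l : List α) (s : String) :
    l.foldl (fun acc x => acc ++ f x) s = s ++ PySem.Str.join "" (l.map f) := by
  induction l generalizing s with
  | nil => simp [PySem.Str.join, PySem.Chars.join_nil]
  | cons x t ih =>
      simp only [List.foldl_cons, List.map_cons, pv_join_cons, ih,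
        String.append_assoc]

-- A's grouping dict, as a list of (country, its players in input order), keyed by first-seen country
theorem pv_items_eq (players : List (List (String × String))) :
    (players.foldl
      (fun d p => d.modify (pvGet p "country" "unknown") [] (fun g => g ++ [p]))
      (PySem.Dict.empty : PySem.Dict String (List (List (String × String))))).items
    = (PySem.Set.ofList (players.map (fun p => pvGet p "country" "unknown"))).map
        (fun c => (c, players.filter (fun p => pvGet p "country" "unknown" == c))) := by
  set key : List (String × String) → String := fun p => pvGet p "country" "unknown" with hkey
  set d := players.foldl
      (fun d p => d.modify (key p) [] (fun g => g ++ [p]))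
      (PySem.Dict.empty : PySem.Dict String (List (List (String × String)))) with hd
  have hnd : d.keys.Nodup := by
    rw [hd]
    exact PySem.Dict.nodup_keys_foldl_modify_key players key []
      (fun _ p g => g ++ [p]) _ PySem.Dict.nodup_keys_empty
  have hkeys : d.keys = PySem.Set.ofList (players.map key) := by
    rw [hd, PySem.Dict.keys_foldl_modify_key players key [] (fun _ p g => g ++ [p]),
      PySem.Dict.keys_empty, PySem.Set.ofList_eq_foldl]
    rfl
  have hget : ∀ c, d.getD c [] = players.filter (fun p => key p == c) := by
    intro c
    have hmap : d = (players.map (fun p => (key p, p))).foldl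
        (fun d q => d.modify q.1 [] (fun g => g ++ [q.2])) PySem.Dict.empty := by
      rw [hd, List.foldl_map]
    rw [hmap, PySem.Dict.getD_foldl_modify_append, PySem.Dict.getD_empty,
      List.nil_append, List.filter_map, List.map_map]
    rw [show ((fun x : String × List (String × String) => x.2) ∘
        (fun p => (key p, p))) = id from rfl, List.map_id]
    rfl
  rw [PySem.Dict.items_eq_map_keys d hnd [], hkeys]
  exact List.map_congr_left (fun c _ => by rw [hget c])

theorem generate_players_markdown_spec_aux (players : List (List (String × String))) :
    generate_players_markdown players = generate_players_markdown_alt players := by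
  set key : List (String × String) → String := fun p => pvGet p "country" "unknown" with hkey
  set g : String → String × List (List (String × String)) :=
    fun c => (c, players.filter (fun p => key p == c)) with hg
  set ks := PySem.Set.ofList (players.map key) with hks
  have hsorted : PySem.List.sorted (ks.map g) (fun pr => pr.1)
      = (PySem.List.sorted ks (fun c => c)).map g := by
    apply PySem.List.sorted_eq_of_perm_of_pairwise_lt
    · exact (PySem.List.sorted_perm ks (fun c => c) false).map g
    · rw [List.pairwise_map]
      exact PySem.List.sorted_ofList_pairwise_lt (players.map key)
  show (PySem.List.sorted
      (players.foldl
        (fun d p => d.modify (key p) [] (fun g => g ++ [p]))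
        (PySem.Dict.empty : PySem.Dict String (List (List (String × String))))).items
      (fun pr => pr.1)).foldl _ _ = _
  rw [pv_items_eq players, hsorted, List.foldl_map]
  have hstep : ∀ (md : String) (c : String),
      (PySem.List.sorted (g c).2 (fun x => pvGet x "name" "")).foldl
        (fun md p =>
          let name := pvGet p "name" ""
          let team := pvGet p "teamTag" ""
          let _pid := pvGet p "id" ""
          let url := pvGet p "url" ""
          let team_str := if team ≠ "" then " [" ++ team ++ "]" else ""
          md ++ ("- **" ++ name ++ "**" ++ team_str ++ " - [VLR Profile](" ++ url ++ ")\n"))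
        (md ++ ("## " ++ PySem.Str.upper (g c).1 ++ "\n\n")) ++ "\n"
      = md ++ pvB_section players c := by
    intro md c
    rw [pv_foldl_append_str]
    simp only [pvB_section, hg, hkey, String.append_assoc]
    have hline : (fun p : List (String × String) =>
        "- **" ++ (pvGet p "name" "" ++ ("**" ++
          ((if pvGet p "teamTag" "" ≠ "" then " [" ++ (pvGet p "teamTag" "" ++ "]") else "") ++
            (" - [VLR Profile](" ++ (pvGet p "url" "" ++ ")\n")))))) = pvB_line := by
      funext p
      simp [pvB_line, String.append_assoc]
    rw [hline]
  simp only [hstep]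
  rw [pv_foldl_append_str (pvB_section players)]
  simp only [generate_players_markdown_alt, hks, hkey]
  rfl

-- ===== VERDICT (by name: the statement is the Claim_ definition above) =====
theorem generate_players_markdown_spec : Claim_equal_generate_players_markdown := by
  intro players _
  unfold Spec_generate_players_markdown
  exact generate_players_markdown_spec_aux players
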